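-- pv_equiv track=rewrite | github.com/thejones/gangstarr | python/gangstarr/reporting.py | _collect_file_locations
-- ===== SOURCE A (Python) =====
-- def _collect_file_locations(groups: list[dict]) -> tuple[list[tuple[str, str]], list[tuple[str, str]]]:
--     """Collect query entry points and resolver file locations from analysis groups.
--
--     Returns (query_locations, resolver_locations) where each is a list of
--     (label, "file:line") tuples, deduplicated and ordered by first appearance.
--     """
--     query_locs: list[tuple[str, str]] = []
--     resolver_locs: list[tuple[str, str]] = []
--     seen = set()
--
--     for g in groups:
--         for cs in g.get('callsites', []):
--             rp = cs.get('resolver_path', '')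
--             loc = f"{cs['file']}:{cs['line']}"
--             if not rp or loc in seen:
--                 continue
--             seen.add(loc)
--             if rp.startswith(('Query.', 'Mutation.', 'Subscription.')):
--                 op_type = rp.split('.', 1)[0].lower()
--                 field = rp.split('.', 1)[1]
--                 query_locs.append((f"{op_type} {field}", loc))
--             else:
--                 resolver_locs.append((f"resolver {rp}", loc))
--
--     return query_locs, resolver_locs
-- ===== SOURCE B (Python) =====
-- def _collect_file_locations(groups: list[dict]) -> tuple[list[tuple[str, str]], list[tuple[str, str]]]:
--     """Two-phase rewrite: first gather deduped (loc, resolver_path) entries,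
--     then build each output list with its own comprehension."""
--     seen = set()
--     entries: list[tuple[str, str]] = []
--     for g in groups:
--         for cs in g.get('callsites', []):
--             rp = cs.get('resolver_path', '')
--             loc = f"{cs['file']}:{cs['line']}"
--             if rp and loc not in seen:
--                 seen.add(loc)
--                 entries.append((loc, rp))
--
--     def is_query(rp: str) -> bool:
--         return rp.startswith(('Query.', 'Mutation.', 'Subscription.'))
--
--     query_locs = [(f"{rp.split('.', 1)[0].lower()} {rp.split('.', 1)[1]}", loc)
--                   for loc, rp in entries if is_query(rp)]
--     resolver_locs = [(f"resolver {rp}", loc)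
--                      for loc, rp in entries if not is_query(rp)]
--     return query_locs, resolver_locs
-- ===== Notes on version B (the rewrite author's own statement) =====
-- stated objective: alternative
-- what changed: A classifies each callsite into the two output lists inside one interleaved dedup loop with three pieces of state; B first builds a single deduplicated (loc, resolver_path) entry list, then derives each output list by its own filter+map comprehension.
import Mathlib
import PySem

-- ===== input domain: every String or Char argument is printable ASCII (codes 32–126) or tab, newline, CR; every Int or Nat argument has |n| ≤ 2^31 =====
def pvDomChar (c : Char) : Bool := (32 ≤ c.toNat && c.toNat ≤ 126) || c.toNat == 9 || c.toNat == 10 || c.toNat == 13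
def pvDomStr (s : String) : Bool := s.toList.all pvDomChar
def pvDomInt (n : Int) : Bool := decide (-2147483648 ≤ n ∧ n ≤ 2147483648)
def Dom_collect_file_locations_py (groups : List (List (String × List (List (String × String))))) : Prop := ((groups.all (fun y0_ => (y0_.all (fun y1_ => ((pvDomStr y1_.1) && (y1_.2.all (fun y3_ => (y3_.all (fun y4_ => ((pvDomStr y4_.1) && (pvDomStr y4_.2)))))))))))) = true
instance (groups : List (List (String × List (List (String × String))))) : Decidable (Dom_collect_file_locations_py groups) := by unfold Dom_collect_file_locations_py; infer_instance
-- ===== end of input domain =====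

-- B replaces A's single interleaved classify-while-deduplicating loop by a dedup pass
-- producing an entry list plus two independent filter+map comprehensions (objective: alternative).
-- ===== PORT A =====
-- shared vocabulary of both Pythons: dict lookups and the small formatting helpers
def pvLookupCS (g : List (String × List (List (String × String)))) : List (List (String × String)) :=
  match g.find? (fun p => p.1 == "callsites") with
  | some p => p.2
  | none => []

def pvLookup? (cs : List (String × String)) (k : String) : Option String :=
  (cs.find? (fun p => p.1 == k)).map (·.2)

def pvRP (cs : List (String × String)) : String := (pvLookup? cs "resolver_path").getD ""

-- cs['file'] / cs['line'] raise KeyError when missing: total here via getD, excluded by Pre_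
def pvLoc (cs : List (String × String)) : String :=
  PySem.Str.join "" [(pvLookup? cs "file").getD "", ":", (pvLookup? cs "line").getD ""]

def pvIsQuery (rp : String) : Bool :=
  PySem.Str.startswith rp "Query." || PySem.Str.startswith rp "Mutation." ||
    PySem.Str.startswith rp "Subscription."

def pvQEntry (rp loc : String) : String × String :=
  let parts := (PySem.Str.splitMax? rp "." 1).getD []
  (PySem.Str.join "" [PySem.Str.lower (parts.getD 0 ""), " ", parts.getD 1 ""], loc)

def pvREntry (rp loc : String) : String × String :=
  (PySem.Str.join "" ["resolver ", rp], loc)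

-- A's loop body: one callsite updates (query_locs, resolver_locs, seen)
def pvStepA
    (st : List (String × String) × List (String × String) × PySem.Set String)
    (cs : List (String × String)) :
    List (String × String) × List (String × String) × PySem.Set String :=
  let rp := pvRP cs
  let loc := pvLoc cs
  if rp == "" || PySem.Set.contains st.2.2 loc then st
  else
    let seen := PySem.Set.add st.2.2 loc
    if pvIsQuery rp then (st.1 ++ [pvQEntry rp loc], st.2.1, seen)
    else (st.1, st.2.1 ++ [pvREntry rp loc], seen)

def collect_file_locations_py (groups : List (List (String × List (List (String × String))))) :
    (List (String × String)) × (List (String × String)) :=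
  let st := groups.foldl (fun st g => (pvLookupCS g).foldl pvStepA st)
    ([], [], PySem.Set.ofList [])
  (st.1, st.2.1)

-- ===== PORT B =====
-- B's first phase: one callsite updates (seen, entries)
def pvStepB (st : PySem.Set String × List (String × String)) (cs : List (String × String)) :
    PySem.Set String × List (String × String) :=
  let rp := pvRP cs
  let loc := pvLoc cs
  if rp != "" && !(PySem.Set.contains st.1 loc) then
    (PySem.Set.add st.1 loc, st.2 ++ [(loc, rp)])
  else st

def collect_file_locations_py_alt (groups : List (List (String × List (List (String × String))))) :
    (List (String × String)) × (List (String × String)) :=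
  let entries := (groups.foldl (fun st g => (pvLookupCS g).foldl pvStepB st)
    (PySem.Set.ofList [], [])).2
  ((entries.filter (fun e => pvIsQuery e.2)).map (fun e => pvQEntry e.2 e.1),
   (entries.filter (fun e => !pvIsQuery e.2)).map (fun e => pvREntry e.2 e.1))

-- ===== PRECONDITION & SPEC =====
-- Pre_ excludes exactly the inputs on which Python A raises KeyError:
-- some visited callsite dict lacks the key 'file' or the key 'line'.
def Pre_collect_file_locations_py (groups : List (List (String × List (List (String × String))))) : Prop :=
  (groups.all (fun g => (pvLookupCS g).all (fun cs =>
    (pvLookup? cs "file").isSome && (pvLookup? cs "line").isSome))) = true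

instance (groups : List (List (String × List (List (String × String))))) :
    Decidable (Pre_collect_file_locations_py groups) := by
  unfold Pre_collect_file_locations_py; infer_instance

def pvWitness_collect_file_locations_py : (List (List (String × List (List (String × String))))) :=
  [[("callsites", [[("file", "a"), ("line", "1"), ("resolver_path", "Query.x")],
                   [("file", "b"), ("line", "2"), ("resolver_path", "myRes")]])]]

def Spec_collect_file_locations_py (groups : List (List (String × List (List (String × String))))) (out : (List (String × String)) × (List (String × String))) : Prop := out = collect_file_locations_py_alt groups
instance (groups : List (List (String × List (List (String × String))))) (out : (List (String × String)) × (List (String × String))) : Decidable (Spec_collect_file_locations_py groups out) := by unfold Spec_collect_file_locations_py; infer_instance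

-- ===== CLAIM (what is proved, stated in full; the proofs are below) =====
def Claim_equal_collect_file_locations_py : Prop := ∀ (groups : List (List (String × List (List (String × String))))), Dom_collect_file_locations_py groups → Pre_collect_file_locations_py groups → Spec_collect_file_locations_py groups (collect_file_locations_py groups)

-- ===== LEMMAS AND PROOFS =====

-- double loop over groups = single loop over the flattened callsite list
theorem pv_foldl_flat {σ : Type} (step : σ → List (String × String) → σ)
    (groups : List (List (String × List (List (String × String))))) (init : σ) :
    groups.foldl (fun st g => (pvLookupCS g).foldl step st) init
      = (groups.flatMap pvLookupCS).foldl step init := by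
  induction groups generalizing init with
  | nil => rfl
  | cons g gs ih => simp [List.flatMap_cons, List.foldl_append, ih]

-- B's first phase: the accumulated entry list is a prefix, seen does not depend on it
theorem pvStepB_accum (css : List (List (String × String)))
    (seen : PySem.Set String) (es : List (String × String)) :
    css.foldl pvStepB (seen, es)
      = ((css.foldl pvStepB (seen, [])).1, es ++ (css.foldl pvStepB (seen, [])).2) := by
  induction css generalizing seen es with
  | nil => simp
  | cons cs css ih =>
    simp only [List.foldl_cons]
    by_cases h : (pvRP cs != "" && !(PySem.Set.contains seen (pvLoc cs))) = true
    · simp only [pvStepB, h, if_pos, List.nil_append]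
      rw [ih, ih (PySem.Set.add seen (pvLoc cs)) [(pvLoc cs, pvRP cs)]]
      simp
    · simp only [pvStepB, h, if_neg, Bool.not_eq_true] at *
      exact ih seen es

-- the core correspondence between A's interleaved loop and B's two phases
theorem pv_main (css : List (List (String × String)))
    (q r : List (String × String)) (seen : PySem.Set String) :
    css.foldl pvStepA (q, r, seen)
      = (q ++ (((css.foldl pvStepB (seen, [])).2.filter (fun e => pvIsQuery e.2)).map
            (fun e => pvQEntry e.2 e.1)),
         r ++ (((css.foldl pvStepB (seen, [])).2.filter (fun e => !pvIsQuery e.2)).map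
            (fun e => pvREntry e.2 e.1)),
         (css.foldl pvStepB (seen, [])).1) := by
  induction css generalizing q r seen with
  | nil => simp
  | cons cs css ih =>
    simp only [List.foldl_cons]
    by_cases h : (pvRP cs == "" || PySem.Set.contains seen (pvLoc cs)) = true
    · have hB : (pvRP cs != "" && !(PySem.Set.contains seen (pvLoc cs))) = false := by
        cases h1 : (pvRP cs == "") <;> cases h2 : PySem.Set.contains seen (pvLoc cs) <;>
          simp_all
      simp only [pvStepA, pvStepB, h, hB, if_pos, Bool.false_eq_true]
      exact ih q r seen
    · have hB : (pvRP cs != "" && !(PySem.Set.contains seen (pvLoc cs))) = true := by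
        cases h1 : (pvRP cs == "") <;> cases h2 : PySem.Set.contains seen (pvLoc cs) <;>
          simp_all
      simp only [pvStepA, pvStepB, hB, if_pos, List.nil_append]
      rw [if_neg h, pvStepB_accum css (PySem.Set.add seen (pvLoc cs)) [(pvLoc cs, pvRP cs)]]
      by_cases hq : pvIsQuery (pvRP cs) = true
      · rw [if_pos hq, ih (q ++ [pvQEntry (pvRP cs) (pvLoc cs)]) r (PySem.Set.add seen (pvLoc cs))]
        simp [hq]
      · rw [if_neg hq, ih q (r ++ [pvREntry (pvRP cs) (pvLoc cs)]) (PySem.Set.add seen (pvLoc cs))]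
        simp [hq]

-- ===== VERDICT (by name: the statement is the Claim_ definition above) =====
theorem collect_file_locations_py_spec : Claim_equal_collect_file_locations_py := by
  intro groups _ _
  unfold Spec_collect_file_locations_py collect_file_locations_py collect_file_locations_py_alt
  rw [pv_foldl_flat pvStepA, pv_foldl_flat pvStepB,
    pv_main (groups.flatMap pvLookupCS) [] [] (PySem.Set.ofList [])]
  simp
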